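-- pv_equiv track=rewrite | github.com/ashooha0/Alsecond | utils/eval_matching_util.py | find_pos_for_phrase_in_tokens
-- ===== SOURCE A (Python) =====
-- def find_pos_for_phrase_in_tokens(sentence_str, string2tokens, phrase):
--     phrase = phrase.lower()
--     phrase = phrase.replace(' ', '')
--     token_pos_from_to = []
--     step_index = 0
--     while (step_index < len(sentence_str)):
--         sub_string = sentence_str[step_index:]
--         if not phrase in sub_string:
--             break
--         pri_pos = step_index + sub_string.index(phrase)
--         token_pos_from_to.append((string2tokens[pri_pos], string2tokens[pri_pos + len(phrase) - 1] + 1))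
--         step_index = pri_pos + len(phrase)
--     return token_pos_from_to
-- ===== SOURCE B (Python) =====
-- def find_pos_for_phrase_in_tokens(sentence_str, string2tokens, phrase):
--     # Two-phase: collect every occurrence start in one scan, then greedily
--     # keep the leftmost non-overlapping ones.
--     needle = phrase.lower().replace(' ', '')
--     m = len(needle)
--     starts = [i for i in range(len(sentence_str) - m + 1)
--               if sentence_str[i:i + m] == needle]
--     result = []
--     nxt = 0
--     for i in starts:
--         if i >= nxt:
--             result.append((string2tokens[i], string2tokens[i + m - 1] + 1))
--             nxt = i + m
--     return result
-- ===== Notes on version B (the rewrite author's own statement) =====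
-- stated objective: alternative
-- what changed: A repeatedly slices the remaining sentence and runs substring search ('in' plus .index) once per match; B collects every occurrence start in a single comprehension pass and then keeps the leftmost non-overlapping ones with one greedy fold, so the search and the selection are decoupled.
-- outside the precondition, e.g. on find_pos_for_phrase_in_tokens('', [], ''): A returns [], B raises IndexError; on find_pos_for_phrase_in_tokens('aaa', [0, 1], 'aa'): A returns [(0, 2)], B returns [(0, 2)]
import Mathlib
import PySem

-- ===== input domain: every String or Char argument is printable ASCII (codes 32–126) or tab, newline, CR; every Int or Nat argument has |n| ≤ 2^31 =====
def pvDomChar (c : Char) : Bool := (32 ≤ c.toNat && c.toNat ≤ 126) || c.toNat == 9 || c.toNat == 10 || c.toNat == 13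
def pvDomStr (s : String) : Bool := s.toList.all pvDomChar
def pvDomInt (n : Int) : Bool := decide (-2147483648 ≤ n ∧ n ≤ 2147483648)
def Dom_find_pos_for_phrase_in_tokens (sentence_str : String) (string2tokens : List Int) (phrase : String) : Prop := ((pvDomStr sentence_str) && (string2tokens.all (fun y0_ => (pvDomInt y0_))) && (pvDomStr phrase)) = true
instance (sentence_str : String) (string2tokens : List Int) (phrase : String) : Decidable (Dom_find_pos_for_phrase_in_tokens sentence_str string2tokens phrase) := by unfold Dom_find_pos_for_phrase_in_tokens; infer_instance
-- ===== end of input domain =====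

-- B replaces A's repeated slice-and-search loop by one pass that collects all
-- occurrence starts and then keeps the leftmost non-overlapping ones (objective:
-- alternative decomposition).

-- ===== PORT A =====
-- A's while loop as fuel recursion (fuel = len+1 suffices whenever the normalized
-- phrase is nonempty, which Pre_ guarantees; with an empty normalized phrase the
-- Python loop never advances and diverges on a nonempty sentence).
-- string2tokens[...] is ported with pyGetD: Pre_ keeps every occurrence's token
-- indices in range, so the default is never read inside Pre_ (Python raises there).
def pvA_loop (cs : List Char) (toks : List Int) (ph : List Char) :
    Nat → Int → List (Int × Int) → List (Int × Int)
  | 0, _, acc => acc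
  | fuel + 1, step, acc =>
    if step < (cs.length : Int) then
      let sub := PySem.List.slice cs (some step) none
      if PySem.Chars.isIn ph sub then
        let pri := step + PySem.Chars.find sub ph
        let a := PySem.List.pyGetD toks pri 0
        let b := PySem.List.pyGetD toks (pri + (ph.length : Int) - 1) 0
        pvA_loop cs toks ph fuel (pri + (ph.length : Int)) (acc ++ [(a, b + 1)])
      else acc
    else acc

def find_pos_for_phrase_in_tokens (sentence_str : String) (string2tokens : List Int) (phrase : String) : List (Int × Int) :=
  let ph := PySem.Chars.replace (PySem.Chars.lower phrase.toList) [' '] []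
  pvA_loop sentence_str.toList string2tokens ph (sentence_str.toList.length + 1) 0 []

-- ===== PORT B =====
def find_pos_for_phrase_in_tokens_alt (sentence_str : String) (string2tokens : List Int) (phrase : String) : List (Int × Int) :=
  let cs := sentence_str.toList
  let needle := PySem.Chars.replace (PySem.Chars.lower phrase.toList) [' '] []
  let m : Int := (needle.length : Int)
  let starts := (PySem.List.pyRange 0 ((cs.length : Int) - m + 1) 1).filter
      (fun i => PySem.List.slice cs (some i) (some (i + m)) == needle)
  (starts.foldl
    (fun p i =>
      if p.2 ≤ i then
        (p.1 ++ [(PySem.List.pyGetD string2tokens i 0,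
                  PySem.List.pyGetD string2tokens (i + m - 1) 0 + 1)], i + m)
      else p)
    ([], 0)).1

-- ===== PRECONDITION & SPEC =====
-- Pre_ excludes (i) an empty normalized phrase (Python A loops forever on any
-- nonempty sentence; on the empty sentence it returns [] while B's tokens lookup
-- raises) and (ii) inputs where some occurrence of the phrase reaches past the end
-- of string2tokens (A raises IndexError when such an occurrence is selected; on the
-- rare inputs where it is skipped as overlapping, A still returns and agrees with B).
def Pre_find_pos_for_phrase_in_tokens (sentence_str : String) (string2tokens : List Int) (phrase : String) : Prop :=
  let needle := PySem.Chars.replace (PySem.Chars.lower phrase.toList) [' '] []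
  needle ≠ [] ∧
  ∀ i < sentence_str.toList.length, needle <+: sentence_str.toList.drop i →
    i + needle.length ≤ string2tokens.length
instance (sentence_str : String) (string2tokens : List Int) (phrase : String) : Decidable (Pre_find_pos_for_phrase_in_tokens sentence_str string2tokens phrase) := by unfold Pre_find_pos_for_phrase_in_tokens; infer_instance

def pvWitness_find_pos_for_phrase_in_tokens : String × List Int × String :=
  ("ab ab", [0, 0, 1, 2, 2], "AB")

def Spec_find_pos_for_phrase_in_tokens (sentence_str : String) (string2tokens : List Int) (phrase : String) (out : List (Int × Int)) : Prop := out = find_pos_for_phrase_in_tokens_alt sentence_str string2tokens phrase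
instance (sentence_str : String) (string2tokens : List Int) (phrase : String) (out : List (Int × Int)) : Decidable (Spec_find_pos_for_phrase_in_tokens sentence_str string2tokens phrase out) := by unfold Spec_find_pos_for_phrase_in_tokens; infer_instance

-- ===== CLAIM (what is proved, stated in full; the proofs are below) =====
def Claim_equal_find_pos_for_phrase_in_tokens : Prop := ∀ (sentence_str : String) (string2tokens : List Int) (phrase : String), Dom_find_pos_for_phrase_in_tokens sentence_str string2tokens phrase → Pre_find_pos_for_phrase_in_tokens sentence_str string2tokens phrase → Spec_find_pos_for_phrase_in_tokens sentence_str string2tokens phrase (find_pos_for_phrase_in_tokens sentence_str string2tokens phrase)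

-- ===== LEMMAS AND PROOFS =====

-- B's fold step and B's occurrence-start list, named for the proofs.
def pvStep (toks : List Int) (m : Int) (p : List (Int × Int) × Int) (i : Int) :
    List (Int × Int) × Int :=
  if p.2 ≤ i then
    (p.1 ++ [(PySem.List.pyGetD toks i 0, PySem.List.pyGetD toks (i + m - 1) 0 + 1)], i + m)
  else p

def pvStarts (cs : List Char) (needle : List Char) : List Int :=
  (PySem.List.pyRange 0 ((cs.length : Int) - (needle.length : Int) + 1) 1).filter
    (fun i => PySem.List.slice cs (some i) (some (i + (needle.length : Int))) == needle)

lemma pv_alt_eq (sentence_str : String) (string2tokens : List Int) (phrase : String) :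
    find_pos_for_phrase_in_tokens_alt sentence_str string2tokens phrase =
      ((pvStarts sentence_str.toList
          (PySem.Chars.replace (PySem.Chars.lower phrase.toList) [' '] [])).foldl
        (pvStep string2tokens
          ((PySem.Chars.replace (PySem.Chars.lower phrase.toList) [' '] []).length : Int))
        ([], 0)).1 := rfl

-- occurrence test of B ↔ prefix of the drop
lemma pv_occ_iff (cs needle : List Char) (i : Int) (hi : 0 ≤ i) :
    ((PySem.List.slice cs (some i) (some (i + (needle.length : Int))) == needle) = true)
      ↔ needle <+: cs.drop i.toNat := by
  lift i to ℕ using hi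
  rw [PySem.List.slice_natCast_add, beq_iff_eq, Int.toNat_natCast]
  constructor
  · intro h; rw [← h]; exact (List.take_prefix _ _)
  · intro h; exact ((List.prefix_iff_eq_take.mp h).symm)

-- membership in pvStarts
lemma pv_mem_starts (cs needle : List Char) (hm : needle ≠ []) (i : Int) :
    i ∈ pvStarts cs needle ↔ 0 ≤ i ∧ needle <+: cs.drop i.toNat := by
  unfold pvStarts
  rw [List.mem_filter]
  rw [PySem.List.mem_pyRange_iff_of_pos (by norm_num : (0:Int) < 1) i]
  constructor
  · rintro ⟨⟨h0, _, _⟩, hf⟩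
    exact ⟨h0, (pv_occ_iff cs needle i h0).mp hf⟩
  · rintro ⟨h0, hp⟩
    have hlen : needle.length ≤ (cs.drop i.toNat).length := hp.length_le
    rw [List.length_drop] at hlen
    have hn : 0 < needle.length := List.length_pos_of_ne_nil hm
    refine ⟨⟨h0, by omega, ⟨i, by ring⟩⟩, (pv_occ_iff cs needle i h0).mpr hp⟩

lemma pv_starts_sorted (cs needle : List Char) : (pvStarts cs needle).Pairwise (· < ·) := by
  unfold pvStarts
  apply List.Pairwise.filter
  rw [PySem.List.pyRange_of_pos _ _ (by norm_num : (0:Int) < 1)]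
  exact List.Pairwise.map _ (fun a b h => by omega) List.pairwise_lt_range

-- elements below the running bound are skipped: filtering them away is harmless
lemma pv_skip (toks : List Int) (m : Int) (hm : 0 ≤ m) (t' : Int) :
    ∀ (l : List Int) (p : List (Int × Int) × Int), t' ≤ p.2 →
      l.foldl (pvStep toks m) p =
        (l.filter (fun i => decide (t' ≤ i))).foldl (pvStep toks m) p := by
  intro l
  induction l with
  | nil => intro p _; rfl
  | cons i l ih =>
    intro p hp
    by_cases h1 : t' ≤ i
    · simp only [List.filter_cons, decide_eq_true h1, List.foldl_cons]
      apply ih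
      unfold pvStep
      split
      · simpa using by omega
      · exact hp
    · have hskip : pvStep toks m p i = p := by
        unfold pvStep; rw [if_neg (by omega)]
      simp only [List.filter_cons, List.foldl_cons, hskip, decide_eq_false h1]
      exact ih p hp

-- a sorted list whose member a is a lower bound starts with a
lemma pv_head_of_min (l : List Int) (a : Int) (hs : l.Pairwise (· < ·)) (ha : a ∈ l)
    (hmin : ∀ x ∈ l, a ≤ x) : ∃ t, l = a :: t := by
  cases l with
  | nil => simp at ha
  | cons b t =>
    rcases List.mem_cons.mp ha with h | h
    · exact ⟨t, by rw [h]⟩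
    · have h1 := (List.pairwise_cons.mp hs).1 a h
      have h2 := hmin b (List.mem_cons_self)
      omega

-- main loop correspondence
lemma pv_main (cs : List Char) (toks : List Int) (needle : List Char)
    (hm : needle ≠ []) :
    ∀ (fuel : Nat) (step : Int) (acc : List (Int × Int)), 0 ≤ step →
      (cs.length : Int) + 1 ≤ (fuel : Int) + step →
      pvA_loop cs toks needle fuel step acc =
        (((pvStarts cs needle).filter (fun i => decide (step ≤ i))).foldl
          (pvStep toks (needle.length : Int)) (acc, step)).1 := by
  have hn : 0 < needle.length := List.length_pos_of_ne_nil hm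
  intro fuel
  induction fuel with
  | zero =>
    intro step acc h0 hfuel
    have hfil : (pvStarts cs needle).filter (fun i => decide (step ≤ i)) = [] := by
      rw [List.filter_eq_nil_iff]
      intro i hi
      have := (pv_mem_starts cs needle hm i).mp hi
      have hlen : needle.length ≤ (cs.drop i.toNat).length := this.2.length_le
      rw [List.length_drop] at hlen
      simp only [decide_eq_true_eq]
      push_cast at hfuel ⊢
      omega
    rw [hfil]
    rfl
  | succ fuel ih =>
    intro step acc h0 hfuel
    show (if step < (cs.length : Int) then _ else _) = _
    by_cases hlt : step < (cs.length : Int)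
    · rw [if_pos hlt]
      by_cases hin : PySem.Chars.isIn needle (PySem.List.slice cs (some step) none) = true
      · rw [if_pos hin]
        -- the first occurrence at or after step
        have hsub : PySem.List.slice cs (some step) none = cs.drop step.toNat :=
          PySem.List.slice_from _ h0
        rw [hsub] at hin ⊢
        have hfind : 0 ≤ PySem.Chars.find (cs.drop step.toNat) needle := by
          rw [PySem.Chars.find_nonneg_iff]
          exact (PySem.Chars.isIn_iff_infix _ _).mp hin
        set d : Int := PySem.Chars.find (cs.drop step.toNat) needle with hd
        have hspec := PySem.Chars.find_spec (s := cs.drop step.toNat) (sub := needle) hfind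
        rw [← hd] at hspec
        set pri : Int := step + d with hpri
        have hpri0 : 0 ≤ pri := by omega
        have hpritn : pri.toNat = step.toNat + d.toNat := by omega
        have hprefix : needle <+: cs.drop pri.toNat := by
          rw [hpritn, ← List.drop_drop]
          exact hspec.1
        have hpmem : pri ∈ pvStarts cs needle :=
          (pv_mem_starts cs needle hm pri).mpr ⟨hpri0, hprefix⟩
        set L := (pvStarts cs needle).filter (fun i => decide (step ≤ i)) with hL
        have hpmemL : pri ∈ L := by
          rw [hL, List.mem_filter]
          exact ⟨hpmem, by simp; omega⟩
        have hmin : ∀ x ∈ L, pri ≤ x := by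
          intro x hx
          rw [hL, List.mem_filter] at hx
          have hxs := (pv_mem_starts cs needle hm x).mp hx.1
          have hxstep : step ≤ x := by simpa using hx.2
          by_contra hcon
          rw [Int.not_le] at hcon
          have hxd : x.toNat - step.toNat < d.toNat := by omega
          have := hspec.2 (x.toNat - step.toNat) hxd
          rw [List.drop_drop, show step.toNat + (x.toNat - step.toNat) = x.toNat by omega] at this
          exact this hxs.2
        have hLsorted : L.Pairwise (· < ·) := (pv_starts_sorted cs needle).filter _
        obtain ⟨T, hT⟩ := pv_head_of_min L pri hLsorted hpmemL hmin
        -- rewrite RHS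
        rw [hT, List.foldl_cons]
        have hstep1 : pvStep toks (needle.length : Int) (acc, step) pri =
            (acc ++ [(PySem.List.pyGetD toks pri 0,
              PySem.List.pyGetD toks (pri + (needle.length : Int) - 1) 0 + 1)],
             pri + (needle.length : Int)) := by
          unfold pvStep
          rw [if_pos (by simp; omega)]
        rw [hstep1]
        -- skip lemma then filter algebra
        rw [pv_skip toks _ (by positivity) (pri + (needle.length : Int)) T _ (le_refl _)]
        have hTfil : T.filter (fun i => decide (pri + (needle.length : Int) ≤ i)) =
            (pvStarts cs needle).filter (fun i => decide (pri + (needle.length : Int) ≤ i)) := by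
          have h1 : L.filter (fun i => decide (pri + (needle.length : Int) ≤ i)) =
              T.filter (fun i => decide (pri + (needle.length : Int) ≤ i)) := by
            rw [hT, List.filter_cons]
            rw [if_neg (by simp; omega)]
          rw [← h1, hL, List.filter_filter]
          apply List.filter_congr
          intro x _
          by_cases hx : pri + (needle.length : Int) ≤ x
          · simp [hx]; omega
          · simp [hx]
        rw [hTfil]
        rw [← ih (pri + (needle.length : Int)) _ (by omega) (by push_cast at hfuel ⊢; omega)]
      · rw [if_neg hin]
        have hfil : (pvStarts cs needle).filter (fun i => decide (step ≤ i)) = [] := by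
          rw [List.filter_eq_nil_iff]
          intro i hi hstep
          have hxs := (pv_mem_starts cs needle hm i).mp hi
          have hstep' : step ≤ i := by simpa using hstep
          apply absurd hin
          simp only [not_not]
          rw [PySem.List.slice_from _ h0, ← PySem.Chars.exists_prefix_drop_iff_isIn]
          refine ⟨i.toNat - step.toNat, ?_⟩
          rw [List.drop_drop, show step.toNat + (i.toNat - step.toNat) = i.toNat by omega]
          exact hxs.2
        rw [hfil]
        rfl
    · rw [if_neg hlt]
      have hfil : (pvStarts cs needle).filter (fun i => decide (step ≤ i)) = [] := by
        rw [List.filter_eq_nil_iff]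
        intro i hi
        have hxs := (pv_mem_starts cs needle hm i).mp hi
        have hlen : needle.length ≤ (cs.drop i.toNat).length := hxs.2.length_le
        rw [List.length_drop] at hlen
        simp only [decide_eq_true_eq]
        omega
      rw [hfil]
      rfl

-- ===== VERDICT (by name: the statement is the Claim_ definition above) =====
theorem find_pos_for_phrase_in_tokens_spec : Claim_equal_find_pos_for_phrase_in_tokens := by
  unfold Claim_equal_find_pos_for_phrase_in_tokens
  intro sentence_str string2tokens phrase _ hPre
  unfold Spec_find_pos_for_phrase_in_tokens
  obtain ⟨hne, -⟩ := hPre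
  rw [pv_alt_eq]
  show pvA_loop _ _ _ _ _ _ = _
  rw [pv_main sentence_str.toList string2tokens _ hne (sentence_str.toList.length + 1) 0 []
    le_rfl (by push_cast; omega)]
  rw [pv_skip string2tokens _ (by positivity) 0 (pvStarts _ _) ([], 0) le_rfl]
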